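-- pv_equiv track=rewrite | github.com/BerhanuBK/python_consonant_vowel_replacement | stringman.py | vow_str_replace
-- ===== SOURCE A (Python) =====
-- vwl = ['a', 'e', 'i', 'o', 'u']
--
-- def vow_str_replace(word):
-- 	length = len(vwl)
-- 	word = word.lower()
-- 	word2 = [x for x in word]
-- 	for c in range(len(word)):
-- 		x=word[c]
-- 		if x in vwl:
-- 			if vwl.index(x) == (length - 1):
-- 				word2[c] = vwl[(vwl.index(x)+1)-length]
-- 			else:
-- 				word2[c] = vwl[vwl.index(x)+1]
-- 	return("".join(word2))
-- ===== SOURCE B (Python) =====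
-- _TBL = str.maketrans('aeiou', 'eioua')
--
-- def vow_str_replace(word):
--     return word.lower().translate(_TBL)
-- ===== Notes on version B (the rewrite author's own statement) =====
-- stated objective: idiomatic
-- what changed: Replaces the index loop with repeated vwl.index scans and in-place list assignment by a single translate() call through a precomputed vowel-rotation table applied to the lowercased string.
import Mathlib
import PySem

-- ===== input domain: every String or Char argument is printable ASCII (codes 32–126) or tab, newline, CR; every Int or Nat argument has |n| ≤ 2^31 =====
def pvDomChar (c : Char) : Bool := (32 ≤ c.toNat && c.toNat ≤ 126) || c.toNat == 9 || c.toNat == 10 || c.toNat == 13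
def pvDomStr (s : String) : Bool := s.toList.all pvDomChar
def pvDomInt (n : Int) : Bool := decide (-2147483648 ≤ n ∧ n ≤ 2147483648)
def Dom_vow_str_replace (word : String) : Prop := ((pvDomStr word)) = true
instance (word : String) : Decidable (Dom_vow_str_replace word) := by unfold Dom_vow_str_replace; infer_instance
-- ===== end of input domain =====

-- B replaces A's index loop (with repeated vwl.index scans and in-place assignment) by a
-- single translation-table pass over the lowercased string; same result, more idiomatic.

-- ===== PORT A =====
def vwl : List Char := ['a', 'e', 'i', 'o', 'u']

-- one iteration of A's `for c in range(len(word))` body (word2[c] assignment via List.set)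
def vowStep (w : List Char) (word2 : List Char) (c : Int) : List Char :=
  match PySem.List.pyGet? w c with
  | none => word2
  | some x =>
    if vwl.contains x then
      if PySem.List.index? vwl x = some (vwl.length - 1) then
        word2.set c.toNat (PySem.List.pyGetD vwl (((PySem.List.index? vwl x).getD 0 : Int) + 1 - vwl.length) ' ')
      else
        word2.set c.toNat (PySem.List.pyGetD vwl (((PySem.List.index? vwl x).getD 0 : Int) + 1) ' ')
    else word2

def vow_str_replace (word : String) : String :=
  let w := PySem.Chars.lower word.toList
  let word2 := w
  String.mk ((PySem.List.pyRange 0 w.length 1).foldl (vowStep w) word2)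

-- ===== PORT B =====
-- the translate table built by str.maketrans('aeiou','eioua')
def vowTbl : PySem.Dict Char Char :=
  PySem.Dict.ofList [('a', 'e'), ('e', 'i'), ('i', 'o'), ('o', 'u'), ('u', 'a')]

def vow_str_replace_alt (word : String) : String :=
  String.mk ((PySem.Chars.lower word.toList).map (fun ch => PySem.Dict.getD vowTbl ch ch))

-- ===== PRECONDITION & SPEC =====
def Spec_vow_str_replace (word : String) (out : String) : Prop := out = vow_str_replace_alt word
instance (word : String) (out : String) : Decidable (Spec_vow_str_replace word out) := by unfold Spec_vow_str_replace; infer_instance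

-- ===== CLAIM (what is proved, stated in full; the proofs are below) =====
def Claim_equal_vow_str_replace : Prop := ∀ (word : String), Dom_vow_str_replace word → Spec_vow_str_replace word (vow_str_replace word)

-- ===== LEMMAS AND PROOFS =====

def shiftV (ch : Char) : Char := PySem.Dict.getD vowTbl ch ch

lemma vowStep_eq (w word2 : List Char) (k : Nat) (hk : k < w.length)
    (hk2 : k < word2.length) (hv : word2[k] = w[k]) :
    vowStep w word2 (k : Int) = word2.set k (shiftV w[k]) := by
  unfold vowStep
  rw [PySem.List.pyGet?_natCast]
  rw [List.getElem?_eq_getElem hk]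
  simp only [Int.toNat_natCast]
  by_cases h : vwl.contains w[k]
  · have : w[k] = 'a' ∨ w[k] = 'e' ∨ w[k] = 'i' ∨ w[k] = 'o' ∨ w[k] = 'u' := by
      simpa [vwl] using h
    rcases this with h' | h' | h' | h' | h' <;> rw [h'] <;> simp [shiftV, vowTbl, vwl] <;> rfl
  · have ht : vowTbl = PySem.Dict.mk
        [('a', 'e'), ('e', 'i'), ('i', 'o'), ('o', 'u'), ('u', 'a')] := by decide
    have hfix : shiftV w[k] = w[k] := by
      simp [vwl] at h
      simp [shiftV, ht, PySem.Dict.getD, PySem.Dict.get?_mk_cons,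
        Ne.symm h.1, Ne.symm h.2.1, Ne.symm h.2.2.1, Ne.symm h.2.2.2.1, Ne.symm h.2.2.2.2,
        PySem.Dict.get?, PySem.Dict.items]
    rw [if_neg h, hfix, ← hv, List.set_getElem_self]

lemma foldl_vowStep (w : List Char) : ∀ (k : Nat), k ≤ w.length →
    ((PySem.List.pyRange k w.length 1).foldl (vowStep w)
      ((w.take k).map shiftV ++ w.drop k)) = w.map shiftV := by
  intro k hk
  induction h : w.length - k generalizing k with
  | zero =>
    have : k = w.length := by omega
    subst this
    simp [PySem.List.pyRange]
  | succ n ih =>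
    have hlt : k < w.length := by omega
    rw [PySem.List.pyRange_one_cons (by exact_mod_cast hlt)]
    simp only [List.foldl_cons]
    rw [vowStep_eq w _ k hlt (by simp; omega)
      (by rw [List.getElem_append_right (by simp [le_of_lt hlt])]
          simp [min_eq_left (le_of_lt hlt), List.getElem_drop])]
    have hset : ((w.take k).map shiftV ++ w.drop k).set k (shiftV w[k])
        = (w.take (k+1)).map shiftV ++ w.drop (k+1) := by
      rw [List.drop_eq_getElem_cons hlt, List.set_append, List.take_add_one,
        List.getElem?_eq_getElem hlt]
      simp [min_eq_left (le_of_lt hlt)]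
      rw [List.drop_eq_getElem_cons hlt, List.set_cons_zero, List.take_add_one,
        List.getElem?_eq_getElem (show k < (w.map shiftV).length by simpa using hlt)]
      simp
    rw [hset]
    have := ih (k+1) (by omega) (by omega)
    simpa using this

-- ===== VERDICT (by name: the statement is the Claim_ definition above) =====
theorem vow_str_replace_spec : Claim_equal_vow_str_replace := by
  intro word _
  unfold Spec_vow_str_replace vow_str_replace vow_str_replace_alt
  have h := foldl_vowStep (PySem.Chars.lower word.toList) 0 (Nat.zero_le _)
  simp only [List.take_zero, List.map_nil, List.nil_append, List.drop_zero] at h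
  show String.mk _ = _
  norm_num at h
  rw [h]
  rfl
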